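-- pv_equiv track=rewrite | github.com/Helioguilhermediassilva/-Twinverse-AI | backend/services/film/storyboard_creator.py | _extract_key_scenes
-- ===== SOURCE A (Python) =====
-- from typing import Dict, Any, List, Optional
--
-- def _extract_key_scenes(screenplay_text: str) -> List[Dict[str, Any]]:
--     """
--     Extracts key scenes from screenplay text.
--     In production, would use NLP to identify important scenes.
--     """
--     # Simple implementation - extract scenes based on "EXT." or "INT." markers
--     scenes = []
--     lines = screenplay_text.split("\n")
--
--     current_scene = None
--     scene_description = []
--
--     for line in lines:
--         if "EXT." in line or "INT." in line:
--             # If we were already processing a scene, save it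
--             if current_scene:
--                 scenes.append({
--                     "title": current_scene,
--                     "description": "\n".join(scene_description)
--                 })
--
--             # Start new scene
--             current_scene = line.strip()
--             scene_description = []
--         elif current_scene and line.strip():
--             scene_description.append(line.strip())
--
--     # Add the last scene if there is one
--     if current_scene:
--         scenes.append({
--             "title": current_scene,
--             "description": "\n".join(scene_description)
--         })
--
--     # Limit to 5 key scenes for storyboard
--     return scenes[:5]
-- ===== SOURCE B (Python) =====
-- from typing import Dict, Any, List
--
--
-- def _is_scene_heading(line: str) -> bool:
--     return "EXT." in line or "INT." in line
--
--
-- def _drop_preamble(lines: List[str]) -> List[str]: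
--     # skip everything before the first scene heading
--     i = 0
--     while i < len(lines) and not _is_scene_heading(lines[i]):
--         i += 1
--     return lines[i:]
--
--
-- def _scene_body(lines: List[str]) -> tuple:
--     # stripped non-empty lines up to (not including) the next heading, plus the rest
--     body = []
--     i = 0
--     while i < len(lines) and not _is_scene_heading(lines[i]):
--         s = lines[i].strip()
--         if s:
--             body.append(s)
--         i += 1
--     return body, lines[i:]
--
--
-- def _extract_key_scenes(screenplay_text: str) -> List[Dict[str, Any]]:
--     lines = screenplay_text.split("\n")
--     rest = _drop_preamble(lines)
--     scenes = []
--     while rest and len(scenes) < 5: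
--         body, rest2 = _scene_body(rest[1:])
--         scenes.append({"title": rest[0].strip(), "description": "\n".join(body)})
--         rest = rest2
--     return scenes
-- ===== Notes on version B (the rewrite author's own statement) =====
-- stated objective: alternative
-- what changed: Replaced the single fold with a running current_scene/scene_description accumulator and a final flush+truncate by a boundary-then-group decomposition: drop the preamble before the first heading, then repeatedly take a heading and span its body lines, stopping as soon as 5 scenes are built.
import Mathlib
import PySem

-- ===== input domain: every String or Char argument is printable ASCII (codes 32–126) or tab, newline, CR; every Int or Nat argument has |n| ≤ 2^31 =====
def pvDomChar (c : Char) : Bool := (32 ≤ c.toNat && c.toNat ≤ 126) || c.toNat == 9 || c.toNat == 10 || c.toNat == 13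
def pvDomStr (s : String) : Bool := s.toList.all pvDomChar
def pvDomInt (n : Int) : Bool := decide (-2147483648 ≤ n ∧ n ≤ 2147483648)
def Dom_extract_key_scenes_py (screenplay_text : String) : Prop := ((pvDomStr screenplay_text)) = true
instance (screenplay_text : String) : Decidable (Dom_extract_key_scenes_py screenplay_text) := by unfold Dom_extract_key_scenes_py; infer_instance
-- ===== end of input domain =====

-- B replaces A's running current_scene/description accumulator by a boundary-then-group
-- decomposition (drop preamble, then heading + body span per scene, stopping at 5 scenes);
-- same return value, no speed claim.

-- a line is a scene heading: "EXT." in line or "INT." in line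
def pvHeading (line : String) : Bool :=
  PySem.Str.isIn "EXT." line || PySem.Str.isIn "INT." line

-- a scene dict {"title": t, "description": "\n".join(body)}
def pvScene (t : String) (body : List String) : List (String × String) :=
  [("title", t), ("description", PySem.Str.join "\n" body)]

-- ===== PORT A =====
-- loop body of A's for-line loop; state = (scenes, current_scene, scene_description);
-- Python truthiness 'if current_scene' = (not None) and (≠ "")
def pvStepA (acc : List (List (String × String)) × Option String × List String)
    (line : String) : List (List (String × String)) × Option String × List String :=
  if pvHeading line then
    ((match acc.2.1 with
      | some c => if c ≠ "" then acc.1 ++ [pvScene c acc.2.2] else acc.1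
      | none => acc.1), some (PySem.Str.strip line), [])
  else
    match acc.2.1 with
    | some c =>
        if c ≠ "" ∧ PySem.Str.strip line ≠ "" then (acc.1, acc.2.1, acc.2.2 ++ [PySem.Str.strip line])
        else acc
    | none => acc

-- the final 'if current_scene: scenes.append(...)'
def pvFlushA (st : List (List (String × String)) × Option String × List String) :
    List (List (String × String)) :=
  match st.2.1 with
  | some c => if c ≠ "" then st.1 ++ [pvScene c st.2.2] else st.1
  | none => st.1

def extract_key_scenes_py (screenplay_text : String) : List (List (String × String)) :=
  let lines := (PySem.Str.split? screenplay_text "\n").getD []   -- sep "\n" ≠ "", never none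
  PySem.List.slice (pvFlushA (lines.foldl pvStepA ([], none, []))) none (some 5)   -- scenes[:5]

-- ===== PORT B =====
-- _drop_preamble: skip lines before the first heading
def pvDropPreamble : List String → List String
  | [] => []
  | l :: ls => if pvHeading l then l :: ls else pvDropPreamble ls

-- _scene_body: stripped non-empty lines before the next heading, plus the rest
def pvSceneBody : List String → List String × List String
  | [] => ([], [])
  | l :: ls =>
      if pvHeading l then ([], l :: ls)
      else
        let br := pvSceneBody ls
        (if PySem.Str.strip l ≠ "" then PySem.Str.strip l :: br.1 else br.1, br.2)

theorem pvSceneBody_rest_le (ls : List String) : (pvSceneBody ls).2.length ≤ ls.length := by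
  induction ls with
  | nil => simp [pvSceneBody]
  | cons l ls ih =>
      simp only [pvSceneBody]
      split
      · simp
      · simpa using Nat.le_succ_of_le ih

-- the while loop collecting up to `limit` scenes
def pvTakeScenes : List String → Nat → List (List (String × String))
  | _, 0 => []
  | [], _ + 1 => []
  | l :: ls, n + 1 =>
      pvScene (PySem.Str.strip l) (pvSceneBody ls).1 :: pvTakeScenes (pvSceneBody ls).2 n
termination_by ls _ => ls.length
decreasing_by exact Nat.lt_succ_of_le (pvSceneBody_rest_le ls)

def extract_key_scenes_py_alt (screenplay_text : String) : List (List (String × String)) :=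
  let lines := (PySem.Str.split? screenplay_text "\n").getD []
  pvTakeScenes (pvDropPreamble lines) 5

-- ===== PRECONDITION & SPEC =====
def Spec_extract_key_scenes_py (screenplay_text : String) (out : List (List (String × String))) : Prop := out = extract_key_scenes_py_alt screenplay_text
instance (screenplay_text : String) (out : List (List (String × String))) : Decidable (Spec_extract_key_scenes_py screenplay_text out) := by unfold Spec_extract_key_scenes_py; infer_instance

-- ===== CLAIM (what is proved, stated in full; the proofs are below) =====
def Claim_equal_extract_key_scenes_py : Prop := ∀ (screenplay_text : String), Dom_extract_key_scenes_py screenplay_text → Spec_extract_key_scenes_py screenplay_text (extract_key_scenes_py screenplay_text)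

-- ===== LEMMAS AND PROOFS =====

-- the uncapped list of scenes of B's grouping (pvTakeScenes without the limit)
def pvAll : List String → List (List (String × String))
  | [] => []
  | l :: ls => pvScene (PySem.Str.strip l) (pvSceneBody ls).1 :: pvAll (pvSceneBody ls).2
termination_by ls => ls.length
decreasing_by exact Nat.lt_succ_of_le (pvSceneBody_rest_le ls)

theorem pvTakeScenes_eq_take (ls : List String) (n : Nat) :
    pvTakeScenes ls n = (pvAll ls).take n := by
  induction ls using pvAll.induct generalizing n with
  | case1 => cases n <;> simp [pvTakeScenes, pvAll]
  | case2 l ls ih =>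
      cases n with
      | zero => simp [pvTakeScenes]
      | succ m => simp [pvTakeScenes, pvAll, ih]

-- a heading line strips to a non-empty string (it contains the non-space char 'E'/'I')
theorem pvHeading_strip_ne (l : String) (h : pvHeading l = true) :
    PySem.Str.strip l ≠ "" := by
  intro he
  have hl : PySem.Chars.strip l.toList = [] := by
    have := congrArg String.toList he
    simpa [PySem.Str.toList_strip] using this
  have hall : ∀ c ∈ l.toList, PySem.Chars.isspace c = true := by
    simp only [PySem.Chars.strip, PySem.Chars.rstrip, PySem.Chars.lstrip] at hl
    have h1 : List.dropWhile PySem.Chars.isspace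
        (List.dropWhile PySem.Chars.isspace l.toList).reverse = [] := by
      simpa using congrArg List.reverse hl
    rw [List.dropWhile_eq_nil_iff] at h1
    intro c hc
    by_cases hs : PySem.Chars.isspace c = true
    · exact hs
    · exfalso
      have hcd : c ∈ List.dropWhile PySem.Chars.isspace l.toList := by
        have hc' : c ∈ List.takeWhile PySem.Chars.isspace l.toList ++
            List.dropWhile PySem.Chars.isspace l.toList := by
          rw [List.takeWhile_append_dropWhile]; exact hc
        rcases List.mem_append.mp hc' with h' | h'
        · exact absurd (List.mem_takeWhile_imp h') hs
        · exact h'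
      exact hs (h1 c (by simpa using hcd))
  -- a heading contains 'X' (from "EXT.") or 'N' (from "INT."), neither is whitespace
  simp only [pvHeading, Bool.or_eq_true, PySem.Str.isIn_iff_infix] at h
  rcases h with h | h
  · have : 'X' ∈ l.toList := h.mem (by decide)
    have := hall _ this
    simp [PySem.Chars.isspace] at this
  · have : 'N' ∈ l.toList := h.mem (by decide)
    have := hall _ this
    simp [PySem.Chars.isspace] at this

-- running-scene invariant of A's fold: from state (scenes, some t, desc), t ≠ "", the fold
-- plus final flush appends the current scene (body extended by this span) and then B's groups
theorem pvFoldA_some (ls : List String) : ∀ (scenes : List (List (String × String)))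
    (t : String) (desc : List String), t ≠ "" →
    pvFlushA (ls.foldl pvStepA (scenes, some t, desc))
      = scenes ++ pvScene t (desc ++ (pvSceneBody ls).1) :: pvAll (pvSceneBody ls).2 := by
  induction ls with
  | nil => intro scenes t desc ht; simp [pvFlushA, pvSceneBody, pvAll, ht]
  | cons l ls ih =>
      intro scenes t desc ht
      by_cases hl : pvHeading l = true
      · have hst := pvHeading_strip_ne l hl
        simp only [List.foldl_cons, pvStepA, hl, if_pos, ht, ne_eq, not_false_iff,
          pvSceneBody]
        rw [ih (scenes ++ [pvScene t desc]) _ [] hst]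
        simp [pvAll]
      · by_cases hs : PySem.Str.strip l ≠ ""
        · simp only [List.foldl_cons, pvStepA, hl, if_neg, Bool.false_eq_true,
            not_false_iff]
          rw [if_pos ⟨ht, hs⟩, ih scenes t _ ht]
          simp [pvSceneBody, hl, hs]
        · simp only [List.foldl_cons, pvStepA, hl, Bool.false_eq_true, if_neg,
            not_false_iff]
          rw [if_neg (by tauto), ih scenes t desc ht]
          simp only [ne_eq, Decidable.not_not] at hs
          simp [pvSceneBody, hl, hs]

-- from the initial state, A's fold + flush is exactly B's uncapped grouping after the preamble
theorem pvFoldA_none (ls : List String) :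
    pvFlushA (ls.foldl pvStepA ([], none, [])) = pvAll (pvDropPreamble ls) := by
  induction ls with
  | nil => simp [pvFlushA, pvDropPreamble, pvAll]
  | cons l ls ih =>
      by_cases hl : pvHeading l = true
      · simp only [List.foldl_cons, pvStepA, hl, if_pos, pvDropPreamble]
        rw [pvFoldA_some ls [] _ [] (pvHeading_strip_ne l hl)]
        simp [pvAll]
      · simp only [List.foldl_cons, pvStepA, hl, Bool.false_eq_true, if_neg,
          not_false_iff, pvDropPreamble]
        simpa [hl] using ih

-- ===== VERDICT (by name: the statement is the Claim_ definition above) =====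
theorem extract_key_scenes_py_spec : Claim_equal_extract_key_scenes_py := by
  intro t _
  unfold Spec_extract_key_scenes_py extract_key_scenes_py extract_key_scenes_py_alt
  rw [PySem.List.slice_to _ (by norm_num), pvFoldA_none, pvTakeScenes_eq_take]
  rfl
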